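-- pv_equiv track=rewrite | github.com/fdominik98/USVLogicSceneGeneration | src/visualization/algo_evaluation/algo_eval_utils.py | config_group_mapper
-- ===== SOURCE A (Python) =====
-- from typing import List
--
-- def config_group_mapper(config_groups : List[str]):
--     labels : List[str] = []
--     for name in config_groups:
--         if 'sbo' in name.lower():
--             labels.append('SBO')
--         elif 'msr' in name.lower():
--             labels.append('MSR')
--         elif 'f3' in name.lower():
--            labels.append(r'$F_3$')
--         elif 'f2' in name.lower():
--             labels.append(r'$F_2$')
--         elif 'f1' in name.lower():
--             labels.append(r'$F_1$')
--         else: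
--             raise Exception('Unknown config group name')
--     return labels
-- ===== SOURCE B (Python) =====
-- # Pattern-major algorithm: instead of deciding each name with a branch chain,
-- # make one pass per pattern (from lowest to highest priority) over all names,
-- # overwriting the label slot whenever the pattern matches; higher-priority
-- # passes run later, so sbo > msr > f3 > f2 > f1 as required.
-- PATTERNS_LOW_TO_HIGH = [('f1', r'$F_1$'), ('f2', r'$F_2$'), ('f3', r'$F_3$'),
--                         ('msr', 'MSR'), ('sbo', 'SBO')]
--
-- def config_group_mapper(config_groups):
--     lows = [name.lower() for name in config_groups]
--     labels = [None] * len(lows)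
--     for sub, lab in PATTERNS_LOW_TO_HIGH:
--         for i, low in enumerate(lows):
--             if sub in low:
--                 labels[i] = lab
--     if None in labels:
--         raise Exception('Unknown config group name')
--     return labels
-- ===== Notes on version B (the rewrite author's own statement) =====
-- stated objective: alternative
-- what changed: Replaces the per-name if/elif branch chain with a pattern-major algorithm: one overwrite pass over all names per pattern in ascending priority order, then a final None check; Pre_ excludes inputs with an unknown name, on which both A and B raise the same Exception.
import Mathlib
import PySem

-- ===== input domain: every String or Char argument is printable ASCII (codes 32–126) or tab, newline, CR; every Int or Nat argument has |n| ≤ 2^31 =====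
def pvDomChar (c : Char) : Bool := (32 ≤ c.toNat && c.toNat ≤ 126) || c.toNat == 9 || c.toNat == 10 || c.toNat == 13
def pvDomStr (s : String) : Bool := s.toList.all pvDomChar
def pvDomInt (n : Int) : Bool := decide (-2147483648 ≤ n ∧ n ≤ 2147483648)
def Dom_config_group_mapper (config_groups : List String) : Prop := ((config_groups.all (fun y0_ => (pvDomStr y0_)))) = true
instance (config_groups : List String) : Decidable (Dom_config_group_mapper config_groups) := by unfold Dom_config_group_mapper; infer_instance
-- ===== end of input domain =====

-- B replaces A's per-name if/elif chain with pattern-major overwrite passes (one pass per pattern,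
-- ascending priority) plus a final None check; same cost, different traversal order.
-- Both raise on an unknown name; Pre_ excludes exactly those inputs.

-- ===== PORT A =====
-- A's loop with its 'labels' accumulator; 'none' marks the raise.
def cgmALoop (names : List String) (labels : List String) : Option (List String) :=
  match names with
  | [] => some labels
  | name :: rest =>
    if PySem.Str.isIn "sbo" (PySem.Str.lower name) then cgmALoop rest (labels ++ ["SBO"])
    else if PySem.Str.isIn "msr" (PySem.Str.lower name) then cgmALoop rest (labels ++ ["MSR"])
    else if PySem.Str.isIn "f3" (PySem.Str.lower name) then cgmALoop rest (labels ++ ["$F_3$"])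
    else if PySem.Str.isIn "f2" (PySem.Str.lower name) then cgmALoop rest (labels ++ ["$F_2$"])
    else if PySem.Str.isIn "f1" (PySem.Str.lower name) then cgmALoop rest (labels ++ ["$F_1$"])
    else none

def config_group_mapper (config_groups : List String) : List String :=
  (cgmALoop config_groups []).getD []

-- ===== PORT B =====
def cgmPatternsLH : List (String × String) :=
  [("f1", "$F_1$"), ("f2", "$F_2$"), ("f3", "$F_3$"), ("msr", "MSR"), ("sbo", "SBO")]

-- one overwrite pass of pattern p over the label slots (the inner 'for i, low' loop)
def cgmPass (p : String × String) (lows : List String) (labels : List (Option String)) :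
    List (Option String) :=
  List.zipWith (fun low cur => if PySem.Str.isIn p.1 low then some p.2 else cur) lows labels

def config_group_mapper_alt (config_groups : List String) : List String :=
  let lows := config_groups.map PySem.Str.lower
  let init : List (Option String) := lows.map (fun _ => none)
  let final := cgmPatternsLH.foldl (fun labels p => cgmPass p lows labels) init
  if final.contains none then []   -- raise Exception('Unknown config group name')
  else final.map (fun o => o.getD "")

-- ===== PRECONDITION & SPEC =====
-- Pre_ excludes inputs containing a name matching none of the five substrings: A raises Exception there.
def Pre_config_group_mapper (config_groups : List String) : Prop :=
  (config_groups.all (fun n =>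
    PySem.Str.isIn "sbo" (PySem.Str.lower n) || PySem.Str.isIn "msr" (PySem.Str.lower n) ||
    PySem.Str.isIn "f3" (PySem.Str.lower n) || PySem.Str.isIn "f2" (PySem.Str.lower n) ||
    PySem.Str.isIn "f1" (PySem.Str.lower n))) = true
instance (config_groups : List String) : Decidable (Pre_config_group_mapper config_groups) := by
  unfold Pre_config_group_mapper; infer_instance
def pvWitness_config_group_mapper : List String := ["SBO_test", "msr-run", "cfgF3", "f2", "x_f1"]

def Spec_config_group_mapper (config_groups : List String) (out : List String) : Prop := out = config_group_mapper_alt config_groups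
instance (config_groups : List String) (out : List String) : Decidable (Spec_config_group_mapper config_groups out) := by unfold Spec_config_group_mapper; infer_instance

-- ===== CLAIM (what is proved, stated in full; the proofs are below) =====
def Claim_equal_config_group_mapper : Prop := ∀ (config_groups : List String), Dom_config_group_mapper config_groups → Pre_config_group_mapper config_groups → Spec_config_group_mapper config_groups (config_group_mapper config_groups)

-- ===== LEMMAS AND PROOFS =====
-- the value A's chain assigns to one name (none = raise)
def cgmChain (name : String) : Option String :=
  if PySem.Str.isIn "sbo" (PySem.Str.lower name) then some "SBO"
  else if PySem.Str.isIn "msr" (PySem.Str.lower name) then some "MSR"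
  else if PySem.Str.isIn "f3" (PySem.Str.lower name) then some "$F_3$"
  else if PySem.Str.isIn "f2" (PySem.Str.lower name) then some "$F_2$"
  else if PySem.Str.isIn "f1" (PySem.Str.lower name) then some "$F_1$"
  else none

lemma zipWith_map_self {α β γ : Type} (h : α → β → γ) (g : α → β) (l : List α) :
    List.zipWith h l (l.map g) = l.map (fun x => h x (g x)) := by
  induction l with
  | nil => rfl
  | cons a t ih => simp [ih]

-- pattern-major folds over a mapped accumulator act pointwise
lemma cgmFold_map (ps : List (String × String)) (lows : List String)
    (g : String → Option String) :
    ps.foldl (fun labels p => cgmPass p lows labels) (lows.map g) =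
      lows.map (fun low => ps.foldl
        (fun cur p => if PySem.Str.isIn p.1 low then some p.2 else cur) (g low)) := by
  induction ps generalizing g with
  | nil => rfl
  | cons p rest ih =>
    simp only [List.foldl_cons, cgmPass, zipWith_map_self]
    exact ih (fun low => if PySem.Str.isIn p.1 low then some p.2 else (g low))

-- per name, the five overwrite passes compute exactly A's chain
lemma cgmPointwise (name : String) :
    cgmPatternsLH.foldl
      (fun cur p => if PySem.Str.isIn p.1 (PySem.Str.lower name) then some p.2 else cur)
      none = cgmChain name := by
  simp only [cgmPatternsLH, List.foldl_cons, List.foldl_nil, cgmChain]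

lemma cgmAlt_eq (config_groups : List String) :
    config_group_mapper_alt config_groups =
      if (config_groups.map cgmChain).contains none then []
      else (config_groups.map cgmChain).map (fun o => o.getD "") := by
  show (if (List.foldl (fun labels p => cgmPass p (config_groups.map PySem.Str.lower) labels)
      ((config_groups.map PySem.Str.lower).map (fun _ => (none : Option String))) cgmPatternsLH).contains none
      then [] else _) = _
  rw [cgmFold_map]
  simp only [List.map_map, Function.comp_def, cgmPointwise]

lemma cgmALoop_eq (names : List String) :
    ∀ acc, cgmALoop names acc = (names.mapM cgmChain).map (acc ++ ·) := by
  induction names with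
  | nil => intro acc; simp [cgmALoop]
  | cons name rest ih =>
    intro acc
    simp only [cgmALoop, List.mapM_cons, cgmChain]
    split_ifs <;>
      simp [ih, Option.bind] <;>
      cases rest.mapM cgmChain <;> simp

lemma cgmChain_isSome (n : String)
    (hn : (PySem.Str.isIn "sbo" (PySem.Str.lower n) || PySem.Str.isIn "msr" (PySem.Str.lower n) ||
      PySem.Str.isIn "f3" (PySem.Str.lower n) || PySem.Str.isIn "f2" (PySem.Str.lower n) ||
      PySem.Str.isIn "f1" (PySem.Str.lower n)) = true) :
    ∃ v, cgmChain n = some v := by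
  unfold cgmChain
  split_ifs with h1 h2 h3 h4 h5
  · exact ⟨_, rfl⟩
  · exact ⟨_, rfl⟩
  · exact ⟨_, rfl⟩
  · exact ⟨_, rfl⟩
  · exact ⟨_, rfl⟩
  · exfalso
    simp only [Bool.not_eq_true] at h1 h2 h3 h4 h5
    rw [h1, h2, h3, h4, h5] at hn
    simp at hn

lemma cgm_mapM_of_pre (config_groups : List String)
    (h : Pre_config_group_mapper config_groups) :
    config_groups.mapM cgmChain = some ((config_groups.map cgmChain).map (fun o => o.getD "")) := by
  unfold Pre_config_group_mapper at h
  induction config_groups with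
  | nil => rfl
  | cons n rest ih =>
    simp only [List.all_cons, Bool.and_eq_true] at h
    obtain ⟨v, hv⟩ := cgmChain_isSome n h.1
    simp [List.mapM_cons, hv, ih h.2]

lemma cgm_no_none_of_pre (config_groups : List String)
    (h : Pre_config_group_mapper config_groups) :
    (config_groups.map cgmChain).contains none = false := by
  unfold Pre_config_group_mapper at h
  induction config_groups with
  | nil => rfl
  | cons n rest ih =>
    simp only [List.all_cons, Bool.and_eq_true] at h
    obtain ⟨v, hv⟩ := cgmChain_isSome n h.1
    have hr := ih h.2
    simp only [List.map_cons, List.contains_cons, hv, hr]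
    simp

-- ===== VERDICT (by name: the statement is the Claim_ definition above) =====
theorem config_group_mapper_spec : Claim_equal_config_group_mapper := by
  intro cg _ hpre
  unfold Spec_config_group_mapper config_group_mapper
  rw [cgmALoop_eq, cgm_mapM_of_pre cg hpre, cgmAlt_eq, cgm_no_none_of_pre cg hpre]
  simp
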